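-- pv_equiv track=rewrite | github.com/ah2/termpyProjectCode | main.py | check_traps
-- ===== SOURCE A (Python) =====
-- def compare(i, j):
--     if i < j:
--         return 1
--     if i > j:
--         return -1
--     return 0
--
-- def check_traps(c_row, c_col, n_row, n_col, trap_board):
--     # check if we reached destination:
--     if c_row == n_row and c_col == n_col:
--         return False, c_row, c_col
--
--     # check if there is a trap in current location:
--     if trap_board[c_row][c_col] == 'T':
--         return True, c_row, c_col
--
--     # get delta movement in X-axis
--     x = compare(c_col, n_col)
--
--     # get delta movement in Y-axis
--     y = compare(c_row, n_row)
--
--     # recursively call with one unit of movement in X, Y axis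
--     return check_traps(c_row + y, c_col + x, n_row, n_col, trap_board)
-- ===== SOURCE B (Python) =====
-- def check_traps(c_row, c_col, n_row, n_col, trap_board):
--     dr = n_row - c_row
--     dc = n_col - c_col
--     sr = (dr > 0) - (dr < 0)
--     sc = (dc > 0) - (dc < 0)
--     steps = max(abs(dr), abs(dc))
--     for i in range(steps):
--         r = c_row + sr * min(i, abs(dr))
--         c = c_col + sc * min(i, abs(dc))
--         if trap_board[r][c] == 'T':
--             return True, r, c
--     return False, n_row, n_col
-- ===== Notes on version B (the rewrite author's own statement) =====
-- stated objective: alternative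
-- what changed: Replaces the recursive walk (with the compare helper) by a bounded for-loop over a closed-form position formula start + sign*min(i, distance), checking each path cell in order and returning (False, n_row, n_col) after the loop.
import Mathlib
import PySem

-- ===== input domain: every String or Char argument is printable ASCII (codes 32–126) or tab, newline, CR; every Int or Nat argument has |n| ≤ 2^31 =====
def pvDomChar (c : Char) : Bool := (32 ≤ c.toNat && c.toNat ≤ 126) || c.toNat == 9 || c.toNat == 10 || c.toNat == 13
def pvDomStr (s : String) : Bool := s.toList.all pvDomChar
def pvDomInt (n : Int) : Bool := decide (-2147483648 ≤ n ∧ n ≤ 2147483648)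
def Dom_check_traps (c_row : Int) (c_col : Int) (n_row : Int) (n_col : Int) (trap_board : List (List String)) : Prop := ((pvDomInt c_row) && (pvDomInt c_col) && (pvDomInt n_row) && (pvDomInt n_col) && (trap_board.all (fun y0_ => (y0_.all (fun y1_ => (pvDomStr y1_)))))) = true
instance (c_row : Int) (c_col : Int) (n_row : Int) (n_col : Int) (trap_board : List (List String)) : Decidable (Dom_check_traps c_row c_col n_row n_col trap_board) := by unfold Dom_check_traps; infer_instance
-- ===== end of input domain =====

-- B replaces A's recursive walk by a bounded for-loop over a closed-form position
-- formula (start + sign * min(i, distance)); same cost, different decomposition.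

-- trap_board[r][c] with Python index semantics (none = IndexError); used by both ports
def pvCell (board : List (List String)) (r c : Int) : Option String :=
  (PySem.List.pyGet? board r).bind fun row => PySem.List.pyGet? row c

-- ===== PORT A =====
def compare (i : Int) (j : Int) : Int :=
  if i < j then 1 else if i > j then -1 else 0

def check_trapsFuel (fuel : Nat) (c_row : Int) (c_col : Int) (n_row : Int) (n_col : Int) (trap_board : List (List String)) : Bool × Int × Int :=
  match fuel with
  | 0 => (false, c_row, c_col)  -- never reached: check_traps passes more fuel than the walk is long
  | fuel + 1 =>
    if c_row = n_row ∧ c_col = n_col then (false, c_row, c_col)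
    else
      match pvCell trap_board c_row c_col with
      | none => (false, c_row, c_col)  -- Python raises IndexError here; such inputs are excluded by Pre_check_traps
      | some s =>
        if s = "T" then (true, c_row, c_col)
        else
          let x := _root_.compare c_col n_col
          let y := _root_.compare c_row n_row
          check_trapsFuel fuel (c_row + y) (c_col + x) n_row n_col trap_board

-- fuel = walk length + 1 (the walk from (c_row,c_col) to (n_row,n_col) takes max(|dr|,|dc|) steps)
def check_traps (c_row : Int) (c_col : Int) (n_row : Int) (n_col : Int) (trap_board : List (List String)) : Bool × Int × Int :=
  check_trapsFuel ((max |n_row - c_row| |n_col - c_col|).toNat + 1) c_row c_col n_row n_col trap_board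

-- ===== PORT B =====
def altLoop (c_row : Int) (c_col : Int) (sr : Int) (sc : Int) (adr : Int) (adc : Int) (n_row : Int) (n_col : Int) (trap_board : List (List String)) : List Int → Bool × Int × Int
  | [] => (false, n_row, n_col)
  | i :: rest =>
    let r := c_row + sr * min i adr
    let c := c_col + sc * min i adc
    -- Python raises IndexError on an invalid cell (excluded by Pre_check_traps); the port continues on none
    if pvCell trap_board r c = some "T" then (true, r, c)
    else altLoop c_row c_col sr sc adr adc n_row n_col trap_board rest

def check_traps_alt (c_row : Int) (c_col : Int) (n_row : Int) (n_col : Int) (trap_board : List (List String)) : Bool × Int × Int :=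
  let dr := n_row - c_row
  let dc := n_col - c_col
  let sr := (if dr > 0 then (1 : Int) else 0) - (if dr < 0 then 1 else 0)
  let sc := (if dc > 0 then (1 : Int) else 0) - (if dc < 0 then 1 else 0)
  let steps := max |dr| |dc|
  altLoop c_row c_col sr sc |dr| |dc| n_row n_col trap_board (PySem.List.pyRange 0 steps 1)

-- ===== PRECONDITION & SPEC =====
-- position of the coordinate walking from a toward b after j steps
def pvPos (a : Int) (b : Int) (j : Int) : Int :=
  a + ((if b - a > 0 then (1 : Int) else 0) - (if b - a < 0 then 1 else 0)) * min j |b - a|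

-- pigeonhole cap: the path positions are pairwise distinct and each board cell is addressable
-- by at most 4 (row,col) index pairs (positive/negative on each axis), so a trap-free walk
-- whose cells are all in range lasts at most 4 * (total number of cells) steps
def pvCap (trap_board : List (List String)) : Int :=
  4 * ((trap_board.map List.length).sum : Nat) + 1

-- Pre_ excludes exactly the inputs on which Python A raises an IndexError: a walk cell reached
-- before the destination and before any trap that is out of range.  The quantifier is cut off at
-- the pigeonhole cap pvCap (walks with more trap-free steps than the cap necessarily contain an
-- out-of-range cell, so nothing on which A returns is excluded); the cap only keeps Pre_ finite.
def Pre_check_traps (c_row : Int) (c_col : Int) (n_row : Int) (n_col : Int) (trap_board : List (List String)) : Prop :=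
  (∀ i ∈ PySem.List.pyRange 0 (min (max |n_row - c_row| |n_col - c_col|) (pvCap trap_board + 1)) 1,
    (∀ j ∈ PySem.List.pyRange 0 i 1, pvCell trap_board (pvPos c_row n_row j) (pvPos c_col n_col j) ≠ some "T") →
    (pvCell trap_board (pvPos c_row n_row i) (pvPos c_col n_col i)).isSome)
  ∧ (max |n_row - c_row| |n_col - c_col| ≤ pvCap trap_board
     ∨ ∃ i ∈ PySem.List.pyRange 0 (pvCap trap_board + 1) 1,
         (∀ j ∈ PySem.List.pyRange 0 i 1, pvCell trap_board (pvPos c_row n_row j) (pvPos c_col n_col j) ≠ some "T")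
         ∧ pvCell trap_board (pvPos c_row n_row i) (pvPos c_col n_col i) = some "T")

instance (c_row : Int) (c_col : Int) (n_row : Int) (n_col : Int) (trap_board : List (List String)) : Decidable (Pre_check_traps c_row c_col n_row n_col trap_board) := by unfold Pre_check_traps; infer_instance

def pvWitness_check_traps : Int × Int × Int × Int × List (List String) :=
  (0, 0, 1, 1, [[".", "."], [".", "."]])

def Spec_check_traps (c_row : Int) (c_col : Int) (n_row : Int) (n_col : Int) (trap_board : List (List String)) (out : Bool × Int × Int) : Prop := out = check_traps_alt c_row c_col n_row n_col trap_board
instance (c_row : Int) (c_col : Int) (n_row : Int) (n_col : Int) (trap_board : List (List String)) (out : Bool × Int × Int) : Decidable (Spec_check_traps c_row c_col n_row n_col trap_board out) := by unfold Spec_check_traps; infer_instance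

-- ===== CLAIM (what is proved, stated in full; the proofs are below) =====
def Claim_equal_check_traps : Prop := ∀ (c_row : Int) (c_col : Int) (n_row : Int) (n_col : Int) (trap_board : List (List String)), Dom_check_traps c_row c_col n_row n_col trap_board → Pre_check_traps c_row c_col n_row n_col trap_board → Spec_check_traps c_row c_col n_row n_col trap_board (check_traps c_row c_col n_row n_col trap_board)

-- ===== LEMMAS AND PROOFS =====

theorem pvPos_zero (a b : Int) : pvPos a b 0 = a := by
  simp [pvPos]

theorem pvPos_eq_iff (a b k : Int) (_hk : 0 ≤ k) : pvPos a b k = b ↔ |b - a| ≤ k := by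
  unfold pvPos
  rcases lt_trichotomy a b with h | h | h
  · rw [abs_of_pos (by omega : (0 : Int) < b - a)]; split_ifs <;> omega
  · subst h; simp; omega
  · rw [abs_of_neg (by omega : b - a < 0)]; split_ifs <;> omega

theorem pvPos_succ (a b k : Int) (_hk : 0 ≤ k) :
    pvPos a b k + _root_.compare (pvPos a b k) b = pvPos a b (k + 1) := by
  unfold pvPos _root_.compare
  rcases lt_trichotomy a b with h | h | h
  · rw [abs_of_pos (by omega : (0 : Int) < b - a)]; split_ifs <;> omega
  · subst h; simp
  · rw [abs_of_neg (by omega : b - a < 0)]; split_ifs <;> omega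

theorem walk (trap_board : List (List String)) (c_row c_col n_row n_col : Int)
    (hsafe : ∀ i, 0 ≤ i → i < max |n_row - c_row| |n_col - c_col| →
      (∀ j, 0 ≤ j → j < i → pvCell trap_board (pvPos c_row n_row j) (pvPos c_col n_col j) ≠ some "T") →
      (pvCell trap_board (pvPos c_row n_row i) (pvPos c_col n_col i)).isSome) :
    ∀ (m : Nat) (k : Int), 0 ≤ k →
      k + (m : Int) = max |n_row - c_row| |n_col - c_col| →
      (∀ j, 0 ≤ j → j < k → pvCell trap_board (pvPos c_row n_row j) (pvPos c_col n_col j) ≠ some "T") →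
      check_trapsFuel (m + 1) (pvPos c_row n_row k) (pvPos c_col n_col k) n_row n_col trap_board
        = altLoop c_row c_col
            ((if n_row - c_row > 0 then (1 : Int) else 0) - (if n_row - c_row < 0 then 1 else 0))
            ((if n_col - c_col > 0 then (1 : Int) else 0) - (if n_col - c_col < 0 then 1 else 0))
            |n_row - c_row| |n_col - c_col| n_row n_col trap_board
            (PySem.List.pyRange k (max |n_row - c_row| |n_col - c_col|) 1) := by
  intro m
  induction m with
  | zero =>
    intro k hk0 hks hnt
    have h1 : |n_row - c_row| ≤ max |n_row - c_row| |n_col - c_col| := le_max_left _ _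
    have h2 : |n_col - c_col| ≤ max |n_row - c_row| |n_col - c_col| := le_max_right _ _
    have hr : pvPos c_row n_row k = n_row := (pvPos_eq_iff _ _ _ hk0).mpr (by omega)
    have hc : pvPos c_col n_col k = n_col := (pvPos_eq_iff _ _ _ hk0).mpr (by omega)
    rw [PySem.List.pyRange_one_eq_nil (by omega)]
    rw [check_trapsFuel, if_pos ⟨hr, hc⟩, hr, hc]
    rfl
  | succ m ih =>
    intro k hk0 hks hnt
    have h1 : |n_row - c_row| ≤ max |n_row - c_row| |n_col - c_col| := le_max_left _ _
    have h2 : |n_col - c_col| ≤ max |n_row - c_row| |n_col - c_col| := le_max_right _ _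
    have hklt : k < max |n_row - c_row| |n_col - c_col| := by omega
    have hdest : ¬(pvPos c_row n_row k = n_row ∧ pvPos c_col n_col k = n_col) := by
      rintro ⟨ha, hb⟩
      rw [pvPos_eq_iff _ _ _ hk0] at ha hb
      omega
    have hsome : (pvCell trap_board (pvPos c_row n_row k) (pvPos c_col n_col k)).isSome :=
      hsafe k hk0 hklt hnt
    obtain ⟨s, hs⟩ := Option.isSome_iff_exists.mp hsome
    rw [PySem.List.pyRange_one_cons hklt]
    rw [check_trapsFuel, if_neg hdest, hs]
    have haltstep : altLoop c_row c_col
        ((if n_row - c_row > 0 then (1 : Int) else 0) - (if n_row - c_row < 0 then 1 else 0))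
        ((if n_col - c_col > 0 then (1 : Int) else 0) - (if n_col - c_col < 0 then 1 else 0))
        |n_row - c_row| |n_col - c_col| n_row n_col trap_board
        (k :: PySem.List.pyRange (k + 1) (max |n_row - c_row| |n_col - c_col|) 1)
        = if pvCell trap_board (pvPos c_row n_row k) (pvPos c_col n_col k) = some "T"
          then (true, pvPos c_row n_row k, pvPos c_col n_col k)
          else altLoop c_row c_col
            ((if n_row - c_row > 0 then (1 : Int) else 0) - (if n_row - c_row < 0 then 1 else 0))
            ((if n_col - c_col > 0 then (1 : Int) else 0) - (if n_col - c_col < 0 then 1 else 0))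
            |n_row - c_row| |n_col - c_col| n_row n_col trap_board
            (PySem.List.pyRange (k + 1) (max |n_row - c_row| |n_col - c_col|) 1) := rfl
    rw [haltstep]
    by_cases hT : s = "T"
    · subst hT
      rw [if_pos hs]
      simp
    · dsimp only
      rw [if_neg hT, if_neg (show ¬ pvCell trap_board (pvPos c_row n_row k) (pvPos c_col n_col k) = some "T" by rw [hs]; simp [hT])]
      rw [pvPos_succ c_col n_col k hk0, pvPos_succ c_row n_row k hk0]
      apply ih (k + 1) (by omega) (by push_cast at hks ⊢; omega)
      intro j hj0 hjk1
      rcases lt_or_eq_of_le (by omega : j ≤ k) with hjk | hjk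
      · exact hnt j hj0 hjk
      · subst hjk; rw [hs]; simp [hT]

-- ===== VERDICT (by name: the statement is the Claim_ definition above) =====
theorem check_traps_spec : Claim_equal_check_traps := by
  intro c_row c_col n_row n_col trap_board _hdom hpre
  unfold Spec_check_traps
  have halt : check_traps_alt c_row c_col n_row n_col trap_board
      = altLoop c_row c_col
          ((if n_row - c_row > 0 then (1 : Int) else 0) - (if n_row - c_row < 0 then 1 else 0))
          ((if n_col - c_col > 0 then (1 : Int) else 0) - (if n_col - c_col < 0 then 1 else 0))
          |n_row - c_row| |n_col - c_col| n_row n_col trap_board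
          (PySem.List.pyRange 0 (max |n_row - c_row| |n_col - c_col|) 1) := rfl
  rw [halt]
  have hsteps : 0 ≤ max |n_row - c_row| |n_col - c_col| :=
    le_trans (abs_nonneg _) (le_max_left _ _)
  have hK0 : 0 ≤ pvCap trap_board := by
    unfold pvCap; positivity
  have hsafe : ∀ i, 0 ≤ i → i < max |n_row - c_row| |n_col - c_col| →
      (∀ j, 0 ≤ j → j < i → pvCell trap_board (pvPos c_row n_row j) (pvPos c_col n_col j) ≠ some "T") →
      (pvCell trap_board (pvPos c_row n_row i) (pvPos c_col n_col i)).isSome := by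
    obtain ⟨h1, h2⟩ := hpre
    intro i hi0 hilt hnt
    rcases h2 with hsmall | ⟨t, ht, hntt, htrap⟩
    · exact h1 i (by rw [PySem.List.mem_pyRange_one]; omega)
        (fun j hj => hnt j (by rw [PySem.List.mem_pyRange_one] at hj; omega)
          (by rw [PySem.List.mem_pyRange_one] at hj; omega))
    · rw [PySem.List.mem_pyRange_one] at ht
      by_cases hi : i ≤ pvCap trap_board
      · exact h1 i (by rw [PySem.List.mem_pyRange_one]; omega)
          (fun j hj => hnt j (by rw [PySem.List.mem_pyRange_one] at hj; omega)
            (by rw [PySem.List.mem_pyRange_one] at hj; omega))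
      · exact absurd htrap (hnt t (by omega) (by omega))
  have := walk trap_board c_row c_col n_row n_col hsafe
    (max |n_row - c_row| |n_col - c_col|).toNat 0 (le_refl 0)
    (by omega) (by intro j hj0 hjk; omega)
  rw [pvPos_zero, pvPos_zero] at this
  exact this
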